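-- pv_equiv track=rewrite | github.com/whereami2048/Algorithm_Study | 프로그래머스/2/172927. 광물 캐기/광물 캐기.py | solution
-- ===== SOURCE A (Python) =====
-- def solution(picks, minerals):
--     answer = 0
--     mineralSort = []
--
--     ableDigAmount = min(sum(picks) * 5, len(minerals))
--     diaCnt, ironCnt, stoneCnt = 0, 0, 0
--
--     for i in range(ableDigAmount):
--         if minerals[i] == 'diamond':
--             diaCnt += 1
--         elif minerals[i] == 'iron':
--             ironCnt += 1
--         elif minerals[i] == 'stone':
--             stoneCnt += 1
--
--         if (i + 1) % 5 == 0 or i == ableDigAmount - 1: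
--             mineralSort.append((diaCnt, ironCnt, stoneCnt))
--             diaCnt, ironCnt, stoneCnt = 0, 0, 0
--
--     mineralSort.sort(key = lambda x : (x[0], x[1], x[2]), reverse = True)
--
--     i = 0
--     for diaCnt, ironCnt, stoneCnt in mineralSort:
--         while picks[i] == 0:
--             i += 1
--
--         if i == 0:
--             answer += (diaCnt + ironCnt + stoneCnt)
--         elif i == 1:
--             answer += (diaCnt * 5 + ironCnt + stoneCnt)
--         elif i == 2:
--             answer += (diaCnt * 25 + ironCnt * 5 + stoneCnt)
--
--         picks[i] -= 1
--
--     return answer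
-- ===== SOURCE B (Python) =====
-- def solution(picks, minerals):
--     # Phase 1: chunk the reachable prefix into groups of 5 and count each kind per group.
--     cap = min(sum(picks) * 5, len(minerals))
--     groups = [(chunk.count('diamond'), chunk.count('iron'), chunk.count('stone'))
--               for chunk in (minerals[k:k + 5] for k in range(0, cap, 5))]
--     groups.sort(reverse=True)
--     # Phase 2: pair each sorted group with its pick tier (lazily expanded) and a weight table.
--     tier_gen = (t for t, p in enumerate(picks) for _ in range(p))
--     pairs = list(zip(tier_gen, groups))
--     W = [(1, 1, 1), (5, 1, 1), (25, 5, 1)]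
--     answer = 0
--     for t, (d, i, s) in pairs:
--         if t < 3:
--             wd, wi, ws = W[t]
--             answer += d * wd + i * wi + s * ws
--         picks[t] -= 1  # same in-place consumption of picks as the original
--     return answer
-- ===== Notes on version B (the rewrite author's own statement) =====
-- stated objective: simpler
-- what changed: Replaces A's streaming per-index counter loop with flush-every-5 bookkeeping by slicing the reachable prefix into 5-chunks counted directly, and replaces the mutable skip-zero greedy pick loop by zipping the sorted groups with a flat expanded tier list and a weight table.
-- outside the precondition, e.g. on solution([-1, 2], ['diamond']): A returns 1, B returns 5; on solution([-1], []): A returns 0, B returns 0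
import Mathlib
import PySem

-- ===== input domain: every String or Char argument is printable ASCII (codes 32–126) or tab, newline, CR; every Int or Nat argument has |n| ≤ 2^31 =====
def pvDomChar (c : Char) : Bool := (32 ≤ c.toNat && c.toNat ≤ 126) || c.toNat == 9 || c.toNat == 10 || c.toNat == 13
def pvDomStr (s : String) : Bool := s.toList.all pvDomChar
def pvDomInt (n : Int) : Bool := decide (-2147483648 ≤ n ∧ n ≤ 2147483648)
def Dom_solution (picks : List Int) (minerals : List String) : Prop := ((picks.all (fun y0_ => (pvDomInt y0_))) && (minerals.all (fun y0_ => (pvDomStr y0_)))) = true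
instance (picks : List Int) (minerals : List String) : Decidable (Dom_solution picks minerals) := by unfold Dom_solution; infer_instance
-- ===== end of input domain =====

-- B replaces A's streaming counter loop (flush every 5) by direct 5-chunk counting, and A's
-- mutable skip-zero greedy pick loop by zipping the sorted groups with an expanded tier list
-- and a weight table; both mutate `picks` identically in Python (equivalence proved on returns).

-- ===== PORT A =====
-- the `while picks[i] == 0: i += 1` loop; reaching the end of the list is Python's IndexError
-- (excluded by Pre_solution)
def skipZeros (picks : List Int) (i : Nat) : Nat :=
  if h : i < picks.length then
    (if picks[i] = 0 then skipZeros picks (i + 1) else i)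
  else i
termination_by picks.length - i

def solution (picks : List Int) (minerals : List String) : Int :=
  let ableDigAmount : Int := min (picks.sum * 5) (minerals.length : Int)
  let st := (PySem.List.pyRange 0 ableDigAmount 1).foldl
    (fun (st : List (Int × Int × Int) × Int × Int × Int) i =>
      let m := PySem.List.pyGetD minerals i ""
      let c := st.2
      let c := if m = "diamond" then (c.1 + 1, c.2.1, c.2.2)
               else if m = "iron" then (c.1, c.2.1 + 1, c.2.2)
               else if m = "stone" then (c.1, c.2.1, c.2.2 + 1)
               else c
      if PySem.Int.mod (i + 1) 5 = 0 ∨ i = ableDigAmount - 1 then (st.1 ++ [c], (0, 0, 0))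
      else (st.1, c))
    ([], (0, 0, 0))
  let mineralSort := PySem.List.sorted st.1 (fun x => toLex (x.1, toLex (x.2.1, x.2.2))) true
  let fin := mineralSort.foldl
    (fun (st : Int × List Int × Nat) g =>
      let i := skipZeros st.2.1 st.2.2
      let ans := if i = 0 then st.1 + (g.1 + g.2.1 + g.2.2)
                 else if i = 1 then st.1 + (g.1 * 5 + g.2.1 + g.2.2)
                 else if i = 2 then st.1 + (g.1 * 25 + g.2.1 * 5 + g.2.2)
                 else st.1
      (ans, st.2.1.set i (st.2.1.getD i 0 - 1), i))
    (0, picks, 0)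
  fin.1

-- ===== PORT B =====
-- the lazy tier generator zipped against the groups: only the first n tier entries are produced
def takeTiers : Nat → Int → List Int → List Int
  | _, _, [] => []
  | n, s, p :: rest =>
    let k := min n p.toNat
    List.replicate k s ++ takeTiers (n - k) (s + 1) rest

def solution_alt (picks : List Int) (minerals : List String) : Int :=
  let cap : Int := min (picks.sum * 5) (minerals.length : Int)
  let groups := (PySem.List.pyRange 0 cap 5).map (fun k =>
      let chunk := PySem.List.slice minerals (some k) (some (k + 5))
      ((PySem.List.count chunk "diamond" : Int),
       ((PySem.List.count chunk "iron" : Int),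
        (PySem.List.count chunk "stone" : Int))))
  let sgroups := PySem.List.sorted groups (fun x => toLex (x.1, toLex x.2)) true
  let pairs := (takeTiers sgroups.length 0 picks).zip sgroups
  let W : List (Int × Int × Int) := [(1, 1, 1), (5, 1, 1), (25, 5, 1)]
  pairs.foldl
    (fun ans tg =>
      if tg.1 < 3 then
        let w := PySem.List.pyGetD W tg.1 (0, 0, 0)
        ans + tg.2.1 * w.1 + tg.2.2.1 * w.2.1 + tg.2.2.2 * w.2.2
      else ans) 0

-- ===== PRECONDITION & SPEC =====
-- Pre_ excludes picks lists containing a negative count, on which A's skip-zero loop either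
-- raises IndexError or treats the negative count as an unlimited pick supply; pick counts are
-- nonnegative in the problem's domain.
def Pre_solution (picks : List Int) (minerals : List String) : Prop :=
  ∀ p ∈ picks, 0 ≤ p
instance (picks : List Int) (minerals : List String) : Decidable (Pre_solution picks minerals) := by
  unfold Pre_solution; infer_instance

def pvWitness_solution : List Int × List String :=
  ([1, 1, 1], ["diamond", "stone", "iron", "stone", "stone", "iron"])

def Spec_solution (picks : List Int) (minerals : List String) (out : Int) : Prop := out = solution_alt picks minerals
instance (picks : List Int) (minerals : List String) (out : Int) : Decidable (Spec_solution picks minerals out) := by unfold Spec_solution; infer_instance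

-- ===== CLAIM (what is proved, stated in full; the proofs are below) =====
def Claim_equal_solution : Prop := ∀ (picks : List Int) (minerals : List String), Dom_solution picks minerals → Pre_solution picks minerals → Spec_solution picks minerals (solution picks minerals)

-- ===== LEMMAS AND PROOFS =====

def countTriple (l : List String) : Int × Int × Int :=
  ((PySem.List.count l "diamond" : Int),
   ((PySem.List.count l "iron" : Int), (PySem.List.count l "stone" : Int)))

def addT (c d : Int × Int × Int) : Int × Int × Int :=
  (c.1 + d.1, (c.2.1 + d.2.1, c.2.2 + d.2.2))

def chunks (l : List String) : List (Int × Int × Int) :=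
  match l with
  | [] => []
  | x :: xs => countTriple ((x :: xs).take 5) :: chunks ((x :: xs).drop 5)
termination_by l.length
decreasing_by simp

def stepChunk (l : List String) (cap : Int)
    (st : List (Int × Int × Int) × Int × Int × Int) (i : Int) :
    List (Int × Int × Int) × Int × Int × Int :=
  let m := PySem.List.pyGetD l i ""
  let c := st.2
  let c := if m = "diamond" then (c.1 + 1, c.2.1, c.2.2)
           else if m = "iron" then (c.1, c.2.1 + 1, c.2.2)
           else if m = "stone" then (c.1, c.2.1, c.2.2 + 1)
           else c
  if PySem.Int.mod (i + 1) 5 = 0 ∨ i = cap - 1 then (st.1 ++ [c], (0, 0, 0))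
  else (st.1, c)

def tiersAux : List Int → Int → List Int
  | [], _ => []
  | p :: rest, s => (PySem.List.pyRange 0 p 1).map (fun _ => s) ++ tiersAux rest (s + 1)

theorem step_counts (c : Int × Int × Int) (x : String) :
    (if x = "diamond" then (c.1 + 1, c.2.1, c.2.2)
     else if x = "iron" then (c.1, c.2.1 + 1, c.2.2)
     else if x = "stone" then (c.1, c.2.1, c.2.2 + 1)
     else c) = addT c (countTriple [x]) := by
  by_cases h1 : x = "diamond"
  · subst h1; simp [addT, countTriple, PySem.List.count_eq]
  · by_cases h2 : x = "iron"
    · subst h2; simp [addT, countTriple, PySem.List.count_eq]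
    · by_cases h3 : x = "stone"
      · subst h3; simp [addT, countTriple, PySem.List.count_eq]
      · simp [h1, h2, h3, addT, countTriple, PySem.List.count_eq]

theorem countTriple_append (u v : List String) :
    countTriple (u ++ v) = addT (countTriple u) (countTriple v) := by
  simp [countTriple, addT, PySem.List.count_eq]

theorem addT_assoc (a b c : Int × Int × Int) : addT (addT a b) c = addT a (addT b c) := by
  simp [addT]; omega

theorem addT_zero (c : Int × Int × Int) : addT (0, 0, 0) c = c := by
  simp [addT]

theorem stepChunk_eq (l : List String) (cap : Int)
    (acc : List (Int × Int × Int)) (c : Int × Int × Int) (i : Int) :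
    stepChunk l cap (acc, c) i =
      (if PySem.Int.mod (i + 1) 5 = 0 ∨ i = cap - 1
        then (acc ++ [addT c (countTriple [PySem.List.pyGetD l i ""])], ((0:Int), (0:Int), (0:Int)))
        else (acc, addT c (countTriple [PySem.List.pyGetD l i ""]))) := by
  rw [stepChunk]
  simp only []
  rw [step_counts]

theorem chunks_cons (l : List String) (h : l ≠ []) :
    chunks l = countTriple (l.take 5) :: chunks (l.drop 5) := by
  cases l with
  | nil => exact absurd rfl h
  | cons x xs => rw [chunks]

theorem segment_counts (l : List String) (cap : Int) (a b : Int) (acc : List (Int × Int × Int))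
    (c : Int × Int × Int)
    (h0 : 0 ≤ a) (hab : a ≤ b) (hbl : b ≤ (l.length : Int))
    (hnf : ∀ x : Int, a ≤ x → x < b → ¬(PySem.Int.mod (x + 1) 5 = 0 ∨ x = cap - 1)) :
    (PySem.List.pyRange a b 1).foldl (stepChunk l cap) (acc, c) =
    (acc, addT c (countTriple (PySem.List.slice l (some a) (some b)))) := by
  obtain ⟨n, hd⟩ : ∃ n, (b - a).toNat = n := ⟨_, rfl⟩
  induction n generalizing a c with
  | zero =>
    rw [PySem.List.pyRange_one_eq_nil (by omega)]
    have hsl : PySem.List.slice l (some a) (some b) = [] := by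
      rw [PySem.List.slice_toNat l h0 (by omega)]
      simp; omega
    simp [hsl, countTriple, addT, PySem.List.count_eq]
  | succ n ih =>
    have hlt : a < b := by omega
    rw [PySem.List.pyRange_one_cons hlt, List.foldl_cons]
    have hnf0 := hnf a (le_refl a) hlt
    rw [stepChunk_eq, if_neg hnf0]
    rw [ih (a + 1) (addT c (countTriple [PySem.List.pyGetD l a ""]))
      (by omega) (by omega) (fun x hx1 hx2 => hnf x (le_trans (by omega : a ≤ a + 1) hx1) hx2)
      (by omega)]
    have hsplit : PySem.List.slice l (some a) (some b) =
        l[a.toNat]'(by omega) :: PySem.List.slice l (some (a + 1)) (some b) := by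
      rw [PySem.List.slice_toNat l h0 (by omega), PySem.List.slice_toNat l (by omega) (by omega)]
      rw [show ((a : Int) + 1).toNat = a.toNat + 1 by omega]
      rw [show (b.toNat - a.toNat) = (b.toNat - (a.toNat + 1)) + 1 by omega]
      rw [List.drop_eq_getElem_cons (by omega), List.take_succ_cons]
    rw [hsplit]
    have hget : PySem.List.pyGetD l a "" = l[a.toNat]'(by omega) := by
      rw [PySem.List.pyGetD_of_nonneg l _ h0]
      rw [List.getD_eq_getElem?_getD, List.getElem?_eq_getElem (by omega)]
      rfl
    rw [hget]
    rw [show (l[a.toNat]'(by omega) :: PySem.List.slice l (some (a+1)) (some b)) =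
        [l[a.toNat]'(by omega)] ++ PySem.List.slice l (some (a+1)) (some b) from rfl]
    rw [countTriple_append, addT_assoc]

theorem phase1_A (l : List String) (cap : Int) (s : Nat) (acc : List (Int × Int × Int))
    (hc0 : 0 ≤ cap) (hcl : cap ≤ (l.length : Int)) (hs : (s : Int) ≤ cap)
    (hdvd : (5:Int) ∣ (s : Int) ∨ (s : Int) = cap) :
    (PySem.List.pyRange s cap 1).foldl (stepChunk l cap) (acc, ((0:Int), (0:Int), (0:Int))) =
    (acc ++ chunks ((l.take cap.toNat).drop s), ((0:Int), (0:Int), (0:Int))) := by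
  obtain ⟨n, hn⟩ : ∃ n, cap.toNat - s = n := ⟨_, rfl⟩
  induction n using Nat.strong_induction_on generalizing s acc with
  | _ n ih =>
  rcases eq_or_lt_of_le hs with hsc | hsc
  · rw [PySem.List.pyRange_one_eq_nil (by omega)]
    have hd : (l.take cap.toNat).drop s = [] := by
      apply List.drop_eq_nil_of_le
      simp; omega
    simp [hd, chunks]
  · have hdv : (5:Int) ∣ (s : Int) := by
      rcases hdvd with h | h
      · exact h
      · omega
    set m : Int := min ((s : Int) + 5) cap with hm
    have hm1 : (s : Int) < m := by omega
    have hm2 : m ≤ cap := by omega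
    rw [PySem.List.pyRange_one_append (s : Int) m cap (by omega) hm2, List.foldl_append]
    rw [show m = (m - 1) + 1 by ring, PySem.List.pyRange_one_succ_right (by omega)]
    rw [List.foldl_append]
    rw [segment_counts l cap (s : Int) (m - 1) acc _ (by omega) (by omega) (by omega) ?nf]
    case nf =>
      intro x hx1 hx2
      rw [not_or]
      constructor
      · intro hmod
        rw [PySem.Int.mod_eq_zero_iff_dvd] at hmod
        obtain ⟨k1, hk1⟩ := hmod
        obtain ⟨k2, hk2⟩ := hdv
        omega
      · omega
    rw [addT_zero]
    simp only [List.foldl_cons, List.foldl_nil]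
    have hflush : PySem.Int.mod ((m - 1) + 1) 5 = 0 ∨ (m - 1) = cap - 1 := by
      rcases le_or_gt ((s : Int) + 5) cap with h | h
      · left
        rw [show (m - 1) + 1 = m by ring, PySem.Int.mod_eq_zero_iff_dvd]
        obtain ⟨k2, hk2⟩ := hdv
        exact ⟨k2 + 1, by omega⟩
      · right; omega
    rw [stepChunk_eq, if_pos hflush]
    rw [show (m - 1) + 1 = m by ring]
    have hrec := ih (cap.toNat - m.toNat) (by omega) m.toNat
      (acc ++ [addT (countTriple (PySem.List.slice l (some (s:Int)) (some (m - 1))))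
        (countTriple [PySem.List.pyGetD l (m - 1) ""])])
      (by omega) ?hd2 rfl
    case hd2 =>
      rcases le_or_gt ((s : Int) + 5) cap with h | h
      · left; obtain ⟨k2, hk2⟩ := hdv; exact ⟨k2 + 1, by omega⟩
      · right; omega
    rw [show ((m.toNat : Int)) = m by omega] at hrec
    rw [hrec, List.append_assoc]
    have hne : (l.take cap.toNat).drop s ≠ [] := by
      intro h
      have := List.drop_eq_nil_iff.mp h
      simp at this
      omega
    have hgetm : PySem.List.pyGetD l (m - 1) "" = l[(m-1).toNat]'(by omega) := by
      rw [PySem.List.pyGetD_of_nonneg l _ (by omega)]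
      rw [List.getD_eq_getElem?_getD, List.getElem?_eq_getElem (by omega)]
      rfl
    have hidx : l[(m-1).toNat]'(by omega) = (l.drop s)[(m-1).toNat - s]'(by simp; omega) := by
      rw [List.getElem_drop]
      congr 1
      omega
    have htk : (l.drop s).take (((m-1).toNat - s) + 1) =
        (l.drop s).take ((m-1).toNat - s) ++ [(l.drop s)[(m-1).toNat - s]'(by simp; omega)] := by
      rw [List.take_succ, List.getElem?_eq_getElem (by simp; omega)]
      rfl
    have hhead : countTriple (((l.take cap.toNat).drop s).take 5) =
        addT (countTriple (PySem.List.slice l (some (s:Int)) (some (m - 1))))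
          (countTriple [PySem.List.pyGetD l (m - 1) ""]) := by
      rw [hgetm, ← countTriple_append]
      congr 1
      rw [PySem.List.slice_toNat l (by omega) (by omega)]
      rw [show ((s : Int).toNat) = s by omega]
      rw [List.drop_take, List.take_take]
      rw [hidx, ← htk]
      congr 1
      omega
    have htail : ((l.take cap.toNat).drop s).drop 5 = (l.take cap.toNat).drop m.toNat := by
      rw [List.drop_drop]
      rcases le_or_gt ((s : Int) + 5) cap with h | h
      · rw [show s + 5 = m.toNat by omega]
      · have h1 : (l.take cap.toNat).drop (s + 5) = [] := by
          apply List.drop_eq_nil_of_le; simp; omega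
        have h2 : (l.take cap.toNat).drop m.toNat = [] := by
          apply List.drop_eq_nil_of_le; simp; omega
        rw [h1, h2]
    rw [chunks_cons _ hne, hhead, htail]
    rfl

theorem pyRange_five_nil (a b : Int) (h : b ≤ a) : PySem.List.pyRange a b 5 = [] := by
  rw [PySem.List.pyRange_of_pos a b (by norm_num)]
  rw [if_neg (by omega)]
  rfl

theorem pyRange_five_cons (a b : Int) (h : a < b) :
    PySem.List.pyRange a b 5 = a :: PySem.List.pyRange (a + 5) b 5 := by
  rw [PySem.List.pyRange_of_pos a b (by norm_num), PySem.List.pyRange_of_pos (a + 5) b (by norm_num)]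
  rcases lt_or_ge (a + 5) b with h5 | h5
  · rw [if_pos h, if_pos h5]
    have : ((b - a + 5 - 1) / 5).toNat = ((b - (a + 5) + 5 - 1) / 5).toNat + 1 := by
      omega
    rw [this, List.range_succ_eq_map]
    simp only [List.map_cons, List.map_map]
    congr 1
    · norm_num
    · refine List.map_congr_left fun k _ => ?_
      simp [Function.comp]
      push_cast
      ring
  · rw [if_pos h, if_neg (by omega)]
    have : ((b - a + 5 - 1) / 5).toNat = 1 := by omega
    rw [this]
    simp

theorem phase1_B (l : List String) (cap : Int) (s : Nat)
    (hc0 : 0 ≤ cap) (hcl : cap ≤ (l.length : Int))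
    (hdvd : ((5:Int) ∣ cap ∨ cap = (l.length : Int)))
    (hsd : (5:Int) ∣ (s : Int)) :
    (PySem.List.pyRange s cap 5).map (fun k =>
      countTriple (PySem.List.slice l (some k) (some (k + 5)))) =
    chunks ((l.take cap.toNat).drop s) := by
  obtain ⟨n, hn⟩ : ∃ n, cap.toNat - s = n := ⟨_, rfl⟩
  induction n using Nat.strong_induction_on generalizing s with
  | _ n ih =>
  rcases le_or_gt cap (s : Int) with hsc | hsc
  · rw [pyRange_five_nil _ _ (by omega)]
    have hd : (l.take cap.toNat).drop s = [] := by
      apply List.drop_eq_nil_of_le; simp; omega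
    simp [hd, chunks]
  · rw [pyRange_five_cons _ _ hsc, List.map_cons]
    have hne : (l.take cap.toNat).drop s ≠ [] := by
      intro h
      have := List.drop_eq_nil_iff.mp h
      simp at this
      omega
    rw [chunks_cons _ hne]
    have hrec := ih (cap.toNat - (s + 5)) (by omega) (s + 5)
      (by push_cast; exact dvd_add hsd ⟨1, by ring⟩) rfl
    congr 1
    · -- head chunk
      congr 1
      rw [PySem.List.slice_toNat l (by omega) (by omega)]
      rw [show ((s : Int).toNat) = s by omega, show (((s : Int) + 5).toNat) = s + 5 by omega]
      rw [List.drop_take, List.take_take]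
      rcases hdvd with h | h
      · congr 1
        obtain ⟨k1, hk1⟩ := h
        obtain ⟨k2, hk2⟩ := hsd
        omega
      · have hcl2 : cap.toNat = l.length := by omega
        rw [hcl2]
        rcases le_or_gt 5 (l.length - s) with h5 | h5
        · congr 1
          omega
        · rw [show min 5 (l.length - s) = l.length - s by omega]
          have hx := List.take_of_length_le (l := l.drop s) (i := s + 5 - s) (by simp; omega)
          have hy := List.take_of_length_le (l := l.drop s) (i := l.length - s) (by simp)
          rw [hx, hy]
    · rw [List.drop_drop, show ((s:Int) + 5) = (((s + 5 : Nat)) : Int) by push_cast; ring]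
      exact hrec

theorem map_const_pyRange (a b : Int) (c : Int) :
    (PySem.List.pyRange a b 1).map (fun _ => c) = List.replicate (b - a).toNat c := by
  rw [List.map_const', PySem.List.length_pyRange_one]

theorem tiersAux_cons (picks : List Int) (j : Nat) (s : Int)
    (hpos : ∀ p ∈ picks, 0 ≤ p)
    (hzero : ∀ k < j, picks.getD k 0 = 0)
    (hj : j < picks.length) (hnz : picks[j] ≠ 0) :
    tiersAux picks s = (s + j) :: tiersAux (picks.set j (picks[j] - 1)) s := by
  induction picks generalizing j s with
  | nil => simp at hj
  | cons p rest ih =>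
    cases j with
    | zero =>
      simp only [List.getElem_cons_zero] at hnz
      have hp : 0 < p := lt_of_le_of_ne (hpos p (by simp)) (Ne.symm hnz)
      simp only [tiersAux, List.set_cons_zero, List.getElem_cons_zero]
      rw [map_const_pyRange, map_const_pyRange]
      have : (p - 0).toNat = ((p - 1) - 0).toNat + 1 := by omega
      rw [this, List.replicate_succ]
      simp
    | succ j' =>
      have hp0 : p = 0 := by have := hzero 0 (by omega); simpa using this
      subst hp0
      simp only [tiersAux, List.set_cons_succ, List.getElem_cons_succ]
      rw [map_const_pyRange]
      have hz' : ∀ k < j', rest.getD k 0 = 0 := fun k hk => by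
        have := hzero (k + 1) (by omega); simpa using this
      rw [ih j' (s+1) (fun p hp => hpos p (by simp [hp])) hz' (by simpa using hj)
        (by simpa using hnz)]
      simp
      omega

theorem tiersAux_ne_nil (picks : List Int) (s : Int) (i : Nat)
    (hzero : ∀ k < i, picks.getD k 0 = 0)
    (hne : tiersAux picks s ≠ []) :
    ∃ m, i ≤ m ∧ m < picks.length ∧ picks.getD m 0 ≠ 0 := by
  induction picks generalizing s i with
  | nil => simp [tiersAux] at hne
  | cons p rest ih =>
    by_cases hp : p = 0
    · subst hp
      simp only [tiersAux, PySem.List.pyRange_one_eq_nil (by omega : (0:Int) ≤ 0),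
        List.map_nil, List.nil_append] at hne
      cases i with
      | zero =>
        obtain ⟨m, _, hm2, hm3⟩ := ih (s + 1) 0 (by omega) hne
        exact ⟨m + 1, by omega, by simpa using hm2, by simpa using hm3⟩
      | succ i' =>
        obtain ⟨m, hm1, hm2, hm3⟩ := ih (s + 1) i'
          (fun k hk => by have := hzero (k + 1) (by omega); simpa using this) hne
        exact ⟨m + 1, by omega, by simpa using hm2, by simpa using hm3⟩
    · cases i with
      | zero => exact ⟨0, le_refl _, by simp, by simpa using hp⟩
      | succ i' => exact absurd (by simpa using hzero 0 (by omega)) hp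

theorem skipZeros_spec (picks : List Int) (i : Nat)
    (hex : ∃ m, i ≤ m ∧ m < picks.length ∧ picks.getD m 0 ≠ 0) :
    i ≤ skipZeros picks i ∧ skipZeros picks i < picks.length ∧
      picks.getD (skipZeros picks i) 0 ≠ 0 ∧
      (∀ k, i ≤ k → k < skipZeros picks i → picks.getD k 0 = 0) := by
  fun_induction skipZeros picks i with
  | case1 i h hz ih =>
    obtain ⟨m, hm1, hm2, hm3⟩ := hex
    have hmi : i ≠ m := by
      intro he; subst he
      exact hm3 (by simpa [List.getD_eq_getElem?_getD, List.getElem?_eq_getElem hm2] using hz)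
    obtain ⟨h1, h2, h3, h4⟩ := ih ⟨m, by omega, hm2, hm3⟩
    refine ⟨by omega, h2, h3, fun k hk1 hk2 => ?_⟩
    rcases Nat.eq_or_lt_of_le hk1 with he | hlt
    · subst he; simpa [List.getD_eq_getElem?_getD, List.getElem?_eq_getElem h] using hz
    · exact h4 k hlt hk2
  | case2 i h hz => 
    refine ⟨le_refl _, h, ?_, fun k hk1 hk2 => by omega⟩
    simpa [List.getD_eq_getElem?_getD, List.getElem?_eq_getElem h] using hz
  | case3 i h =>
    obtain ⟨m, hm1, hm2, hm3⟩ := hex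
    omega

theorem greedy_eq (gs : List (Int × Int × Int)) (picks : List Int) (i : Nat) (ans : Int)
    (hpos : ∀ p ∈ picks, 0 ≤ p)
    (hzero : ∀ k < i, picks.getD k 0 = 0)
    (hlen : gs.length ≤ (tiersAux picks 0).length) :
    (gs.foldl
      (fun (st : Int × List Int × Nat) g =>
        let i := skipZeros st.2.1 st.2.2
        let ans := if i = 0 then st.1 + (g.1 + g.2.1 + g.2.2)
                   else if i = 1 then st.1 + (g.1 * 5 + g.2.1 + g.2.2)
                   else if i = 2 then st.1 + (g.1 * 25 + g.2.1 * 5 + g.2.2)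
                   else st.1
        (ans, st.2.1.set i (st.2.1.getD i 0 - 1), i))
      (ans, picks, i)).1 =
    ((tiersAux picks 0).zip gs).foldl
      (fun ans tg =>
        if tg.1 < 3 then
          let w := PySem.List.pyGetD [((1:Int), (1:Int), (1:Int)), (5, 1, 1), (25, 5, 1)] tg.1 (0, 0, 0)
          ans + tg.2.1 * w.1 + tg.2.2.1 * w.2.1 + tg.2.2.2 * w.2.2
        else ans) ans := by
  induction gs generalizing picks i ans with
  | nil => simp
  | cons g gs ih =>
    have hne : tiersAux picks 0 ≠ [] := by
      intro he; rw [he] at hlen; simp at hlen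
    obtain ⟨m, hm1, hm2, hm3⟩ := tiersAux_ne_nil picks 0 i hzero hne
    obtain ⟨hj1, hj2, hj3, hj4⟩ := skipZeros_spec picks i ⟨m, hm1, hm2, hm3⟩
    set j := skipZeros picks i with hjdef
    have hgd : picks.getD j 0 = picks[j] := by
      simp [List.getD_eq_getElem?_getD, List.getElem?_eq_getElem hj2]
    have hjz : ∀ k < j, picks.getD k 0 = 0 := by
      intro k hk
      rcases Nat.lt_or_ge k i with h | h
      · exact hzero k h
      · exact hj4 k h hk
    have hnz : picks[j] ≠ 0 := by rw [← hgd]; exact hj3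
    have hcons := tiersAux_cons picks j 0 hpos hjz hj2 hnz
    set picks' := picks.set j (picks[j] - 1) with hp'
    have hpos' : ∀ p ∈ picks', 0 ≤ p := by
      intro p hp
      rcases List.mem_or_eq_of_mem_set hp with h | h
      · exact hpos p h
      · have := hpos picks[j] (List.getElem_mem hj2); omega
    have hzero' : ∀ k < j, picks'.getD k 0 = 0 := by
      intro k hk
      rw [hp', List.getD_eq_getElem?_getD, List.getElem?_set_ne (by omega)]
      rw [← List.getD_eq_getElem?_getD]
      exact hjz k hk
    have hlen' : gs.length ≤ (tiersAux picks' 0).length := by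
      rw [hcons] at hlen; simpa using hlen
    rw [hcons]
    simp only [List.zip_cons_cons, List.foldl_cons]
    rw [← hjdef, hgd, ← hp']
    rw [← ih picks' j _ hpos' hzero' hlen']
    congr 2
    match j with
    | 0 => norm_num [PySem.List.pyGetD]; ring
    | 1 => norm_num [PySem.List.pyGetD, show ((1:Int).toNat = 1) from rfl]; ring
    | 2 => norm_num [PySem.List.pyGetD, show ((2:Int).toNat = 2) from rfl]; ring
    | (n + 3) =>
      have h3 : ¬((0:Int) + ((n:Int) + 3) < 3) := by omega
      norm_num
      omega

theorem length_tiersAux (picks : List Int) (s : Int) :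
    (tiersAux picks s).length = (picks.map Int.toNat).sum := by
  induction picks generalizing s with
  | nil => simp [tiersAux]
  | cons p rest ih => simp [tiersAux, PySem.List.length_pyRange_one, ih]

theorem takeTiers_eq_take (picks : List Int) (n : Nat) (s : Int) :
    takeTiers n s picks = (tiersAux picks s).take n := by
  induction picks generalizing n s with
  | nil => simp [takeTiers, tiersAux]
  | cons p rest ih =>
    rw [takeTiers, tiersAux, List.take_append]
    simp only [List.length_map, PySem.List.length_pyRange_one]
    rw [map_const_pyRange, List.take_replicate, ih]
    congr 2 <;> omega

theorem zip_take_of_le {α β : Type} (gs : List β) (l : List α) (n : Nat)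
    (h : gs.length ≤ n) : (l.take n).zip gs = l.zip gs := by
  induction gs generalizing l n with
  | nil => simp
  | cons g gs ih =>
    cases l with
    | nil => simp
    | cons x xs =>
      cases n with
      | zero => simp at h
      | succ m =>
        simp only [List.take_succ_cons, List.zip_cons_cons]
        rw [ih xs m (by simpa using h)]

theorem sum_toNat (picks : List Int) (hpos : ∀ p ∈ picks, 0 ≤ p) :
    (((picks.map Int.toNat).sum : Nat) : Int) = picks.sum := by
  induction picks with
  | nil => simp
  | cons p rest ih =>
    simp only [List.map_cons, List.sum_cons, Nat.cast_add]
    rw [ih (fun x hx => hpos x (by simp [hx]))]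
    have := hpos p (by simp)
    omega

theorem chunks_length (l : List String) : (chunks l).length = (l.length + 4) / 5 := by
  fun_induction chunks l with
  | case1 => simp
  | case2 x xs ih =>
    simp only [List.length_cons, ih]
    simp
    omega


theorem solutionA_eq (picks : List Int) (minerals : List String) :
    solution picks minerals =
    ((PySem.List.sorted
        ((PySem.List.pyRange 0 (min (picks.sum * 5) ((minerals.length : Int))) 1).foldl
          (stepChunk minerals (min (picks.sum * 5) ((minerals.length : Int))))
          ([], ((0:Int), (0:Int), (0:Int)))).1
        (fun x => toLex (x.1, toLex (x.2.1, x.2.2))) true).foldl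
      (fun (st : Int × List Int × Nat) g =>
        let i := skipZeros st.2.1 st.2.2
        let ans := if i = 0 then st.1 + (g.1 + g.2.1 + g.2.2)
                   else if i = 1 then st.1 + (g.1 * 5 + g.2.1 + g.2.2)
                   else if i = 2 then st.1 + (g.1 * 25 + g.2.1 * 5 + g.2.2)
                   else st.1
        (ans, st.2.1.set i (st.2.1.getD i 0 - 1), i))
      (0, picks, 0)).1 := rfl

theorem solutionB_eq (picks : List Int) (minerals : List String) :
    solution_alt picks minerals =
    ((takeTiers
        (PySem.List.sorted
          ((PySem.List.pyRange 0 (min (picks.sum * 5) ((minerals.length : Int))) 5).map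
            (fun k => countTriple (PySem.List.slice minerals (some k) (some (k + 5)))))
          (fun x => toLex (x.1, toLex x.2)) true).length 0 picks).zip
      (PySem.List.sorted
        ((PySem.List.pyRange 0 (min (picks.sum * 5) ((minerals.length : Int))) 5).map
          (fun k => countTriple (PySem.List.slice minerals (some k) (some (k + 5)))))
        (fun x => toLex (x.1, toLex x.2)) true)).foldl
      (fun ans tg =>
        if tg.1 < 3 then
          let w := PySem.List.pyGetD [((1:Int), (1:Int), (1:Int)), (5, 1, 1), (25, 5, 1)] tg.1 (0, 0, 0)
          ans + tg.2.1 * w.1 + tg.2.2.1 * w.2.1 + tg.2.2.2 * w.2.2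
        else ans) 0 := rfl

-- ===== VERDICT (by name: the statement is the Claim_ definition above) =====
theorem solution_spec : Claim_equal_solution := by
  intro picks minerals _ hpre
  unfold Spec_solution
  have hsum : (0:Int) ≤ picks.sum := List.sum_nonneg hpre
  set cap : Int := min (picks.sum * 5) ((minerals.length : Int)) with hcap
  have hc0 : 0 ≤ cap := le_min (by nlinarith) (by positivity)
  have hcl : cap ≤ (minerals.length : Int) := min_le_right _ _
  have hdvd : (5:Int) ∣ cap ∨ cap = (minerals.length : Int) := by
    rcases le_total (picks.sum * 5) ((minerals.length : Int)) with h | h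
    · left
      rw [hcap, min_eq_left h]
      exact ⟨picks.sum, by ring⟩
    · right
      rw [hcap, min_eq_right h]
  have hA := phase1_A minerals cap 0 [] hc0 hcl (by exact_mod_cast hc0) (Or.inl ⟨0, by ring⟩)
  simp only [Nat.cast_zero, List.drop_zero, List.nil_append] at hA
  have hB := phase1_B minerals cap 0 hc0 hcl hdvd (by simp)
  simp only [Nat.cast_zero, List.drop_zero] at hB
  have hlen : (PySem.List.sorted (chunks (minerals.take cap.toNat))
      (fun (x : Int × Int × Int) => toLex (x.1, toLex (x.2.1, x.2.2))) true).length ≤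
      (tiersAux picks 0).length := by
    rw [PySem.List.length_sorted, chunks_length, length_tiersAux]
    have h1 : (minerals.take cap.toNat).length = cap.toNat := by
      simp
      omega
    have h2 := sum_toNat picks hpre
    have h3 : cap ≤ picks.sum * 5 := min_le_left _ _
    rw [h1]
    omega
  rw [solutionA_eq, solutionB_eq, ← hcap, hA, hB, takeTiers_eq_take,
    zip_take_of_le _ _ _ (le_refl _)]
  exact greedy_eq _ picks 0 0 hpre (fun k hk => absurd hk (Nat.not_lt_zero k)) hlen
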